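-- pv_equiv track=rewrite | github.com/Kira262/VirtualPaintApp | virtual_paint.py | is_finger_near_palette
-- ===== SOURCE A (Python) =====
-- colors = [
--     (255, 0, 0),  # Blue
--     (0, 255, 0),  # Green
--     (0, 0, 255),  # Red
--     (0, 255, 255),  # Yellow
--     (255, 0, 255),  # Magenta
--     (255, 255, 0),  # Cyan
-- ]
--
-- def is_finger_near_palette(x, y, ui_params):
--     """Check if finger is in palette area with dynamic positioning"""
--     for i in range(len(colors)):
--         palette_rect_x = ui_params["palette_x"] + i * (
--             ui_params["palette_size"] + ui_params["palette_gap"]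
--         )
--         if (
--             palette_rect_x <= x <= palette_rect_x + ui_params["palette_size"]
--             and ui_params["palette_y"]
--             <= y
--             <= ui_params["palette_y"] + ui_params["palette_size"]
--         ):
--             return i
--     return -1
-- ===== SOURCE B (Python) =====
-- # B: compute the candidate box index in closed form instead of scanning the palette.
-- colors = [
--     (255, 0, 0),
--     (0, 255, 0),
--     (0, 0, 255),
--     (0, 255, 255),
--     (255, 0, 255),
--     (255, 255, 0),
-- ]
--
-- def is_finger_near_palette(x, y, ui_params):
--     """Check if finger is in palette area with dynamic positioning"""
--     size = ui_params["palette_size"]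
--     span = size + ui_params["palette_gap"]
--     d = x - ui_params["palette_x"]
--     i = max(-((size - d) // span), 0)  # first box whose right edge reaches x
--     if (
--         i < len(colors)
--         and i * span <= d <= i * span + size
--         and ui_params["palette_y"] <= y <= ui_params["palette_y"] + size
--     ):
--         return i
--     return -1
-- ===== Notes on version B (the rewrite author's own statement) =====
-- stated objective: alternative
-- what changed: Replaces the scan over the 6 palette boxes with a closed-form candidate index (ceiling division of x-palette_x by span = size + gap) plus one containment test; Pre_ excludes, besides the KeyError inputs, the degenerate layouts with non-positive span where B divides by zero (span = 0) or the boxes overlap so that several contain the finger at once and no single index is the specified answer (span < 0 with a hit).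
import Mathlib
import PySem

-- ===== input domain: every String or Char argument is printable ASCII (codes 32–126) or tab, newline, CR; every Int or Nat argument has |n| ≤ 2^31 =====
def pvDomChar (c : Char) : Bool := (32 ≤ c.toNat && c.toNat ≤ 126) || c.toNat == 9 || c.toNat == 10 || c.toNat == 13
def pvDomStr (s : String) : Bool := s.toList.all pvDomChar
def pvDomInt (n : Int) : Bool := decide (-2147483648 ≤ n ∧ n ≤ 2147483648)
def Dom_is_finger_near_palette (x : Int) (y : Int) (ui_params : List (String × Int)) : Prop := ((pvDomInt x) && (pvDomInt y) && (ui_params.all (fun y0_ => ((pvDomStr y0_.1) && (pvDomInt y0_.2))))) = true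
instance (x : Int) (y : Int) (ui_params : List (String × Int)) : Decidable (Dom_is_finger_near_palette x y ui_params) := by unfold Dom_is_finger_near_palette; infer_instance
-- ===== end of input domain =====

-- B computes the candidate palette index in closed form (ceiling division) instead of scanning the 6 boxes (alternative decomposition, same cost on n=6).


-- ===== PORT A =====
-- first-match lookup in the association list = Python dict lookup (Pre_ guarantees the key is present where it is read)
def pvLookup : List (String × Int) → String → Option Int
  | [], _ => none
  | (k, v) :: rest, key => if k = key then some v else pvLookup rest key

def colorsA : List (Int × Int × Int) :=
  [(255, 0, 0), (0, 255, 0), (0, 0, 255), (0, 255, 255), (255, 0, 255), (255, 255, 0)]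

-- the 'for i in range(len(colors)): … return i' loop with its early return
def loopA (x y px py size gap : Int) : List Int → Int
  | [] => -1
  | i :: rest =>
    let palette_rect_x := px + i * (size + gap)
    if palette_rect_x ≤ x ∧ x ≤ palette_rect_x + size ∧ py ≤ y ∧ y ≤ py + size then i
    else loopA x y px py size gap rest

def is_finger_near_palette (x : Int) (y : Int) (ui_params : List (String × Int)) : Int :=
  loopA x y ((pvLookup ui_params "palette_x").getD 0) ((pvLookup ui_params "palette_y").getD 0)
    ((pvLookup ui_params "palette_size").getD 0) ((pvLookup ui_params "palette_gap").getD 0)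
    (PySem.List.pyRange 0 (colorsA.length : Int) 1)

-- ===== PORT B =====
def colorsB : List (Int × Int × Int) :=
  [(255, 0, 0), (0, 255, 0), (0, 0, 255), (0, 255, 255), (255, 0, 255), (255, 255, 0)]

-- closed-form candidate: i = max(-((size - d) // span), 0), the first box whose right edge reaches x, then one containment test
def is_finger_near_palette_alt (x : Int) (y : Int) (ui_params : List (String × Int)) : Int :=
  let size := (pvLookup ui_params "palette_size").getD 0
  let span := size + (pvLookup ui_params "palette_gap").getD 0
  let d := x - (pvLookup ui_params "palette_x").getD 0
  let i := max (-(PySem.Int.floordiv (size - d) span)) 0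
  if i < (colorsB.length : Int) ∧ i * span ≤ d ∧ d ≤ i * span + size ∧
      (pvLookup ui_params "palette_y").getD 0 ≤ y ∧ y ≤ (pvLookup ui_params "palette_y").getD 0 + size
  then i else -1

-- ===== PRECONDITION & SPEC =====
-- Pre_ excludes the inputs where A raises KeyError ("palette_x"/"palette_size"/"palette_gap" always read;
-- "palette_y" read only once some box x-contains x), and the degenerate layouts with non-positive span
-- (palette_size + palette_gap ≤ 0): there B divides by zero (span = 0), or the boxes overlap and several
-- contain the finger at once, so no single index is the specified answer (first-vs-last match; span < 0 with a hit).
def Pre_is_finger_near_palette (x : Int) (y : Int) (ui_params : List (String × Int)) : Prop :=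
  let px := (pvLookup ui_params "palette_x").getD 0
  let py := (pvLookup ui_params "palette_y").getD 0
  let size := (pvLookup ui_params "palette_size").getD 0
  let span := size + (pvLookup ui_params "palette_gap").getD 0
  (ui_params.any (·.1 = "palette_x")) = true ∧ (ui_params.any (·.1 = "palette_size")) = true ∧
  (ui_params.any (·.1 = "palette_gap")) = true ∧
  ((ui_params.any (·.1 = "palette_y")) = true ∨
    ∀ i ∈ [(0 : Int), 1, 2, 3, 4, 5], ¬ (px + i * span ≤ x ∧ x ≤ px + i * span + size)) ∧
  span ≠ 0 ∧
  (0 < span ∨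
    ∀ i ∈ [(0 : Int), 1, 2, 3, 4, 5],
      ¬ (px + i * span ≤ x ∧ x ≤ px + i * span + size ∧ py ≤ y ∧ y ≤ py + size))
instance (x : Int) (y : Int) (ui_params : List (String × Int)) : Decidable (Pre_is_finger_near_palette x y ui_params) := by unfold Pre_is_finger_near_palette; infer_instance

def pvWitness_is_finger_near_palette : Int × Int × (List (String × Int)) :=
  (30, 5, [("palette_x", 10), ("palette_y", 0), ("palette_size", 20), ("palette_gap", 5)])

def Spec_is_finger_near_palette (x : Int) (y : Int) (ui_params : List (String × Int)) (out : Int) : Prop := out = is_finger_near_palette_alt x y ui_params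
instance (x : Int) (y : Int) (ui_params : List (String × Int)) (out : Int) : Decidable (Spec_is_finger_near_palette x y ui_params out) := by unfold Spec_is_finger_near_palette; infer_instance

-- ===== CLAIM (what is proved, stated in full; the proofs are below) =====
def Claim_equal_is_finger_near_palette : Prop := ∀ (x : Int) (y : Int) (ui_params : List (String × Int)), Dom_is_finger_near_palette x y ui_params → Pre_is_finger_near_palette x y ui_params → Spec_is_finger_near_palette x y ui_params (is_finger_near_palette x y ui_params)

-- ===== LEMMAS AND PROOFS =====
-- positive span: the scan equals the clamped closed-form candidate
lemma coreB (x y px py size gap : Int) (hs : 0 < size + gap) :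
    loopA x y px py size gap [0, 1, 2, 3, 4, 5] =
      (if max (-(PySem.Int.floordiv (size - (x - px)) (size + gap))) 0 < 6 ∧
          max (-(PySem.Int.floordiv (size - (x - px)) (size + gap))) 0 * (size + gap) ≤ x - px ∧
          x - px ≤ max (-(PySem.Int.floordiv (size - (x - px)) (size + gap))) 0 * (size + gap) + size ∧
          py ≤ y ∧ y ≤ py + size
       then max (-(PySem.Int.floordiv (size - (x - px)) (size + gap))) 0 else -1) := by
  obtain ⟨f, hf⟩ : ∃ f, PySem.Int.floordiv (size - (x - px)) (size + gap) = f := ⟨_, rfl⟩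
  have h1 := @PySem.Int.le_floordiv_iff_mul_le (size - (x - px)) (size + gap) 1 hs
  have h0 := @PySem.Int.le_floordiv_iff_mul_le (size - (x - px)) (size + gap) 0 hs
  have hm1 := @PySem.Int.le_floordiv_iff_mul_le (size - (x - px)) (size + gap) (-1) hs
  have hm2 := @PySem.Int.le_floordiv_iff_mul_le (size - (x - px)) (size + gap) (-2) hs
  have hm3 := @PySem.Int.le_floordiv_iff_mul_le (size - (x - px)) (size + gap) (-3) hs
  have hm4 := @PySem.Int.le_floordiv_iff_mul_le (size - (x - px)) (size + gap) (-4) hs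
  have hm5 := @PySem.Int.le_floordiv_iff_mul_le (size - (x - px)) (size + gap) (-5) hs
  rw [hf] at h1 h0 hm1 hm2 hm3 hm4 hm5 ⊢
  rcases (show f ≤ -6 ∨ f = -5 ∨ f = -4 ∨ f = -3 ∨ f = -2 ∨ f = -1 ∨ 0 ≤ f by omega)
    with h | h | h | h | h | h | h
  · rw [if_neg (by rintro ⟨h6, -⟩; omega)]
    simp only [loopA]; split_ifs <;> omega
  all_goals first
  | (rw [h]; norm_num; simp only [loopA]; split_ifs <;> omega)
  | (rw [show max (-f) 0 = 0 by omega]; simp only [loopA]; split_ifs <;> omega)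

-- when no box contains the finger, the scan returns -1 …
lemma missA (x y px py size gap : Int)
    (hm : ∀ i ∈ [(0 : Int), 1, 2, 3, 4, 5],
      ¬ (px + i * (size + gap) ≤ x ∧ x ≤ px + i * (size + gap) + size ∧ py ≤ y ∧ y ≤ py + size)) :
    loopA x y px py size gap [0, 1, 2, 3, 4, 5] = -1 := by
  have g0 := hm 0 (by simp); have g1 := hm 1 (by simp); have g2 := hm 2 (by simp)
  have g3 := hm 3 (by simp); have g4 := hm 4 (by simp); have g5 := hm 5 (by simp)
  simp only [loopA]; split_ifs
  all_goals omega

-- … and so does the closed form: its containment test asserts exactly that some box (its candidate) contains the finger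
lemma missB (x y px py size gap f : Int)
    (hm : ∀ i ∈ [(0 : Int), 1, 2, 3, 4, 5],
      ¬ (px + i * (size + gap) ≤ x ∧ x ≤ px + i * (size + gap) + size ∧ py ≤ y ∧ y ≤ py + size)) :
    (if max (-f) 0 < 6 ∧ max (-f) 0 * (size + gap) ≤ x - px ∧
        x - px ≤ max (-f) 0 * (size + gap) + size ∧ py ≤ y ∧ y ≤ py + size
     then max (-f) 0 else -1) = -1 := by
  rw [if_neg]
  rintro ⟨h6, hle, hge, hy1, hy2⟩
  rcases (show max (-f) 0 = 0 ∨ max (-f) 0 = 1 ∨ max (-f) 0 = 2 ∨ max (-f) 0 = 3 ∨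
      max (-f) 0 = 4 ∨ max (-f) 0 = 5 by omega) with h | h | h | h | h | h
  · rw [h] at hle hge; exact hm 0 (by simp) ⟨by omega, by omega, hy1, hy2⟩
  · rw [h] at hle hge; exact hm 1 (by simp) ⟨by omega, by omega, hy1, hy2⟩
  · rw [h] at hle hge; exact hm 2 (by simp) ⟨by omega, by omega, hy1, hy2⟩
  · rw [h] at hle hge; exact hm 3 (by simp) ⟨by omega, by omega, hy1, hy2⟩
  · rw [h] at hle hge; exact hm 4 (by simp) ⟨by omega, by omega, hy1, hy2⟩
  · rw [h] at hle hge; exact hm 5 (by simp) ⟨by omega, by omega, hy1, hy2⟩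

-- ===== VERDICT (by name: the statement is the Claim_ definition above) =====
theorem is_finger_near_palette_spec : Claim_equal_is_finger_near_palette := by
  intro x y ui _ hpre
  obtain ⟨-, -, -, -, -, hspan⟩ := hpre
  unfold Spec_is_finger_near_palette is_finger_near_palette is_finger_near_palette_alt
  simp only [colorsA, colorsB, List.length]
  show loopA x y _ _ _ _ (PySem.List.pyRange 0 6 1) = _
  rw [show PySem.List.pyRange 0 (6 : Int) 1 = [0, 1, 2, 3, 4, 5] by decide]
  rcases hspan with hs | hmiss
  · exact coreB x y _ _ _ _ hs
  · rw [missA _ _ _ _ _ _ hmiss]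
    exact (missB x y _ _ _ _ _ hmiss).symm
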